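-- pv_equiv track=rewrite | github.com/jomedinagomez/MLOPs-AzureML | src/traffic/select_slot.py | _determine_slot
-- ===== SOURCE A (Python) =====
-- from typing import Dict
--
-- def _determine_slot(traffic: Dict[str, int], default_slot: str, alternate_slot: str) -> str:
--     if not traffic:
--         return default_slot
--
--     normalized = {name.lower(): weight for name, weight in traffic.items()}
--     if default_slot not in normalized:
--         return default_slot
--     if alternate_slot not in normalized:
--         return alternate_slot
--
--     min_weight = min(normalized.values())
--     candidates = [name for name, weight in normalized.items() if weight == min_weight]
--     if alternate_slot in candidates:
--         return alternate_slot
--     if default_slot in candidates: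
--         return default_slot
--     return candidates[0]
-- ===== SOURCE B (Python) =====
-- def _determine_slot(traffic, default_slot, alternate_slot):
--     if not traffic:
--         return default_slot
--
--     normalized = {name.lower(): weight for name, weight in traffic.items()}
--     if default_slot not in normalized:
--         return default_slot
--     if alternate_slot not in normalized:
--         return alternate_slot
--
--     # one pass: pick the entry with the lexicographically smallest (weight, rank),
--     # where rank prefers alternate_slot, then default_slot, then insertion order
--     best_name = None
--     best_key = None
--     for i, (name, weight) in enumerate(normalized.items()):
--         if name == alternate_slot:
--             rank = 0
--         elif name == default_slot:
--             rank = 1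
--         else:
--             rank = 2 + i
--         key = (weight, rank)
--         if best_key is None or key < best_key:
--             best_key = key
--             best_name = name
--     return best_name
-- ===== Notes on version B (the rewrite author's own statement) =====
-- stated objective: alternative
-- what changed: Replaced A's min(values) + candidates filter + three-branch membership cascade by a single selection pass over the items that minimizes the lexicographic key (weight, rank) with rank = 0 for alternate_slot, 1 for default_slot, 2+index otherwise.
import Mathlib
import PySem

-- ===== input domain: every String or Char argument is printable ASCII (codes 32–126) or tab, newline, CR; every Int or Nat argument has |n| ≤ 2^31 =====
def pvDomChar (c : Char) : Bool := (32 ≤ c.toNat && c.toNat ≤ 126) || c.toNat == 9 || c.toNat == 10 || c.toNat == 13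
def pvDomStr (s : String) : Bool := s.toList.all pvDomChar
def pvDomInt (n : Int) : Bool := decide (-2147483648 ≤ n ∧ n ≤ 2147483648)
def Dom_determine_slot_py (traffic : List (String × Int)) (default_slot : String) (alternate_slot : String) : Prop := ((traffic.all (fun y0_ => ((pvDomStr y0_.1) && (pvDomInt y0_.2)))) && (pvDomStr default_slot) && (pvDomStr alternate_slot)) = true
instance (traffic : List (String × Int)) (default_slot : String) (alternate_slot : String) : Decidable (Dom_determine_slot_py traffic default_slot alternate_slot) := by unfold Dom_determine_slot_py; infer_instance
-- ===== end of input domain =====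

-- B replaces A's min + candidates + cascade by a single selection pass with a lexicographic
-- (weight, rank) key; same guards and normalization; equal return value on every input.

-- shared helper: the `normalized = {name.lower(): weight for name, weight in traffic.items()}`
-- line, identical in A's and B's Python
def pvNormalized (traffic : List (String × Int)) : PySem.Dict String Int :=
  ((PySem.Dict.ofList traffic).items).foldl
    (fun acc p => acc.insert (PySem.Str.lower p.1) p.2) PySem.Dict.empty

-- ===== PORT A =====
def determine_slot_py (traffic : List (String × Int)) (default_slot : String) (alternate_slot : String) : String :=
  if (PySem.Dict.ofList traffic).items.isEmpty then default_slot
  else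
    let normalized := pvNormalized traffic
    if !(normalized.contains default_slot) then default_slot
    else if !(normalized.contains alternate_slot) then alternate_slot
    else
      match PySem.List.min? normalized.values (fun x => x) with
      | none => default_slot   -- unreachable: normalized is nonempty here
      | some min_weight =>
        let candidates := (normalized.items.filter (fun p => p.2 == min_weight)).map Prod.fst
        if candidates.contains alternate_slot then alternate_slot
        else if candidates.contains default_slot then default_slot
        else (PySem.List.pyGet? candidates 0).getD default_slot  -- candidates[0]; get? never none here

-- ===== PORT B =====
-- B-side helpers: the rank key and the loop body of Source B's selection pass
def pvRank (alt deft : String) (i : Int) (n : String) : Int :=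
  if n == alt then 0 else if n == deft then 1 else 2 + i

def pvStep (alt deft : String) (best : Option (String × Int × Int)) (p : Int × String × Int) :
    Option (String × Int × Int) :=
  let rank := pvRank alt deft p.1 p.2.1
  match best with
  | none => some (p.2.1, p.2.2, rank)
  | some (bn, bw, br) =>
    if p.2.2 < bw ∨ (p.2.2 = bw ∧ rank < br) then some (p.2.1, p.2.2, rank) else some (bn, bw, br)

def determine_slot_py_alt (traffic : List (String × Int)) (default_slot : String) (alternate_slot : String) : String :=
  if (PySem.Dict.ofList traffic).items.isEmpty then default_slot
  else
    let normalized := pvNormalized traffic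
    if !(normalized.contains default_slot) then default_slot
    else if !(normalized.contains alternate_slot) then alternate_slot
    else
      match (PySem.List.enumerate normalized.items 0).foldl (pvStep alternate_slot default_slot) none with
      | some (n, _, _) => n
      | none => default_slot   -- unreachable: normalized is nonempty here

-- ===== PRECONDITION & SPEC =====
def Spec_determine_slot_py (traffic : List (String × Int)) (default_slot : String) (alternate_slot : String) (out : String) : Prop := out = determine_slot_py_alt traffic default_slot alternate_slot
instance (traffic : List (String × Int)) (default_slot : String) (alternate_slot : String) (out : String) : Decidable (Spec_determine_slot_py traffic default_slot alternate_slot out) := by unfold Spec_determine_slot_py; infer_instance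

-- ===== CLAIM (what is proved, stated in full; the proofs are below) =====
def Claim_equal_determine_slot_py : Prop := ∀ (traffic : List (String × Int)) (default_slot : String) (alternate_slot : String), Dom_determine_slot_py traffic default_slot alternate_slot → Spec_determine_slot_py traffic default_slot alternate_slot (determine_slot_py traffic default_slot alternate_slot)

-- ===== LEMMAS AND PROOFS =====

-- A-side abstractions over the items list (b = first item, t = rest)
def pvMinWt (b : String × Int) (t : List (String × Int)) : Int :=
  (t.map Prod.snd).foldl min b.2

def pvHasNW (n : String) (w : Int) (l : List (String × Int)) : Bool :=
  l.any (fun p => p.1 == n && p.2 == w)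

def pvFirstW (w : Int) (l : List (String × Int)) : String :=
  match l.find? (fun p => p.2 == w) with
  | some p => p.1
  | none => ""

def pvF (alt deft : String) (b : String × Int) (t : List (String × Int)) : String :=
  let mw := pvMinWt b t
  if pvHasNW alt mw (b :: t) then alt
  else if pvHasNW deft mw (b :: t) then deft
  else pvFirstW mw (b :: t)

-- total-state version of Source B's loop body (state is always `some` after the first item)
def pvStepS (alt deft : String) (b : String × Int × Int) (p : Int × String × Int) : String × Int × Int :=
  let rank := pvRank alt deft p.1 p.2.1
  if p.2.2 < b.2.1 ∨ (p.2.2 = b.2.1 ∧ rank < b.2.2) then (p.2.1, p.2.2, rank) else b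

-- invariant carried by the loop: the stored rank br belongs to the stored name bn
def pvInv (alt deft : String) (i : Int) (bn : String) (br : Int) : Prop :=
  (bn = alt → br = 0) ∧ (bn ≠ alt → bn = deft → br = 1) ∧
  (bn ≠ alt → bn ≠ deft → 2 ≤ br ∧ br < 2 + i)

theorem pvFoldl_step_some (alt deft : String) (xs : List (Int × String × Int)) :
    ∀ b, xs.foldl (pvStep alt deft) (some b) = some (xs.foldl (pvStepS alt deft) b) := by
  induction xs with
  | nil => intro b; rfl
  | cons p xs ih =>
    intro b
    simp only [List.foldl_cons]
    have : pvStep alt deft (some b) p = some (pvStepS alt deft b p) := by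
      simp only [pvStep, pvStepS]
      split_ifs <;> rfl
    rw [this, ih]

theorem pvHasNW_cons (n : String) (w : Int) (p : String × Int) (l : List (String × Int)) :
    pvHasNW n w (p :: l) = ((p.1 == n && p.2 == w) || pvHasNW n w l) := by
  simp [pvHasNW]

theorem pvFirstW_cons (w : Int) (p : String × Int) (l : List (String × Int)) :
    pvFirstW w (p :: l) = if p.2 == w then p.1 else pvFirstW w l := by
  simp only [pvFirstW, List.find?_cons]
  by_cases h : p.2 = w
  · simp [h]
  · have h' : (p.2 == w) = false := by simp [h]
    simp [h']

theorem pvFoldlMin_le_init (l : List Int) : ∀ x : Int, l.foldl min x ≤ x := by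
  induction l with
  | nil => intro x; simp
  | cons y l ih =>
    intro x
    simp only [List.foldl_cons]
    exact le_trans (ih _) (min_le_left _ _)

theorem pvFoldlMin_attained (l : List Int) : ∀ x : Int, l.foldl min x = x ∨ l.foldl min x ∈ l := by
  induction l with
  | nil => intro x; simp
  | cons y l ih =>
    intro x
    simp only [List.foldl_cons]
    rcases ih (min x y) with h | h
    · rw [h]
      rcases min_cases x y with ⟨h1, _⟩ | ⟨h1, _⟩
      · left; exact h1
      · right; rw [h1]; simp
    · right; exact List.mem_cons_of_mem _ h

-- the minimum is unchanged when the first two entries are merged into their key-minimum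
theorem pvMinWt_step (bn n : String) (bw w : Int) (t : List (String × Int)) :
    pvMinWt (bn, bw) ((n, w) :: t) = (t.map Prod.snd).foldl min (min bw w) := by
  simp [pvMinWt]

-- dropping the loser when the incumbent b wins (¬(key e < key b))
theorem pvDrop_b (alt deft bn n : String) (bw br w i : Int) (t : List (String × Int))
    (hInv : pvInv alt deft i bn br) (hi : 0 ≤ i)
    (hcond : ¬ (w < bw ∨ (w = bw ∧ pvRank alt deft i n < br))) :
    pvF alt deft (bn, bw) ((n, w) :: t) = pvF alt deft (bn, bw) t := by
  obtain ⟨h0, h1, h2⟩ := hInv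
  push_neg at hcond
  obtain ⟨hbw, hrk⟩ := hcond
  have hm : pvMinWt (bn, bw) ((n, w) :: t) = pvMinWt (bn, bw) t := by
    rw [pvMinWt_step]; simp [pvMinWt]; congr 1; omega
  set m := pvMinWt (bn, bw) t with hmdef
  have hm_le_bw : m ≤ bw := pvFoldlMin_le_init _ _
  simp only [pvF, hm, ← hmdef, pvHasNW_cons, pvFirstW_cons]
  by_cases hwm : w = m
  · -- the dropped entry has minimal weight; then bw = m too and ranks decide
    have hbwm : bw = m := by omega
    have hbr0 : 0 ≤ br := by
      by_cases ha : bn = alt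
      · have := h0 ha; omega
      · by_cases hd : bn = deft
        · have := h1 ha hd; omega
        · have := h2 ha hd; omega
    by_cases hna : n = alt
    · -- rank of e is 0, so br = 0, so bn = alt : condition 1 true on both sides
      have : pvRank alt deft i n = 0 := by simp [pvRank, hna]
      have hbr : br = 0 := by omega
      have hbna : bn = alt := by
        by_cases ha : bn = alt
        · exact ha
        · by_cases hd : bn = deft
          · have := h1 ha hd; omega
          · have := h2 ha hd; omega
      simp [hbna, hbwm]
    · by_cases hnd : n = deft
      · have hrE : pvRank alt deft i n = 1 := by
          have hna' : (n == alt) = false := by simp [hna]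
          have hnd' : (n == deft) = true := by simp [hnd]
          simp [pvRank, hna', hnd']
        by_cases ha : bn = alt
        · simp [ha, hbwm]
        · have hbd : bn = deft := by
            by_cases hd : bn = deft
            · exact hd
            · have := h2 ha hd; have := h0; omega
          have hbna : (bn == alt) = false := by simp [ha]
          simp [hbd, hbna, hbwm, hna]
      · -- e is an "other": it only matters for branch 3, where bw = m puts bn first anyway
        have hna' : (n == alt) = false := by simp [hna]
        have hnd' : (n == deft) = false := by simp [hnd]
        simp [hna', hnd', hbwm]
  · -- dropped entry is not minimal: it contributes nothing anywhere
    have hwm' : (w == m) = false := by simp [hwm]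
    simp [hwm']

-- dropping the loser when the new entry e wins (key e < key b)
theorem pvDrop_e (alt deft bn n : String) (bw br w i : Int) (t : List (String × Int))
    (hInv : pvInv alt deft i bn br) (hi : 0 ≤ i)
    (hcond : w < bw ∨ (w = bw ∧ pvRank alt deft i n < br)) :
    pvF alt deft (bn, bw) ((n, w) :: t) = pvF alt deft (n, w) t := by
  obtain ⟨h0, h1, h2⟩ := hInv
  have hwbw : w ≤ bw := by rcases hcond with h | ⟨h, _⟩ <;> omega
  have hm : pvMinWt (bn, bw) ((n, w) :: t) = pvMinWt (n, w) t := by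
    rw [pvMinWt_step]; simp [pvMinWt]; congr 1; omega
  set m := pvMinWt (n, w) t with hmdef
  have hm_le_w : m ≤ w := pvFoldlMin_le_init _ _
  simp only [pvF, hm, ← hmdef, pvHasNW_cons, pvFirstW_cons]
  by_cases hbwm : bw = m
  · -- the dropped incumbent has minimal weight, so w = m = bw and rank e < rank b
    have hwm : w = m := by omega
    have hrk : pvRank alt deft i n < br := by
      rcases hcond with h | ⟨_, h⟩
      · omega
      · exact h
    have hrE_nonneg : 0 ≤ pvRank alt deft i n := by
      simp only [pvRank]; split_ifs <;> omega
    by_cases ha : bn = alt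
    · have := h0 ha; omega
    · have hbna : (bn == alt) = false := by simp [ha]
      by_cases hd : bn = deft
      · -- br = 1, so rank e = 0, so n = alt: branch 1 fires on both sides
        have hbr : br = 1 := h1 ha hd
        have hna : n = alt := by
          by_contra hna
          have : 1 ≤ pvRank alt deft i n := by
            simp only [pvRank]
            split_ifs with hh hh2
            · exact absurd (by simpa using hh) hna
            · omega
            · omega
          omega
        simp [hna, hwm]
      · have ⟨hbr2, hbrlt⟩ := h2 ha hd
        have hbnd : (bn == deft) = false := by simp [hd]
        by_cases hna : n = alt
        · simp [hna, hwm]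
        · by_cases hnd : n = deft
          · -- cond2 fires via e on both sides (if cond1 is false); branch 3 unreachable
            have hna' : (n == alt) = false := by simp [hna]
            simp [hnd, hna', hbna, hbnd, hwm]
          · -- both "other": rank e = 2 + i ≥ br contradiction with br < 2 + i
            exfalso
            have : pvRank alt deft i n = 2 + i := by simp [pvRank, hna, hnd]
            omega
  · -- dropped incumbent not minimal: contributes nothing anywhere
    have hbwm' : (bw == m) = false := by simp [hbwm]
    simp [hbwm']

theorem pvInv_rank (alt deft n : String) (i : Int) (hi : 0 ≤ i) :
    pvInv alt deft (i + 1) n (pvRank alt deft i n) := by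
  refine ⟨fun h => ?_, fun h1 h2 => ?_, fun h1 h2 => ?_⟩
  · simp [pvRank, h]
  · have e1 : (n == alt) = false := by simp [h1]
    have e2 : (n == deft) = true := by simp [h2]
    simp [pvRank, e1, e2]
  · have e1 : (n == alt) = false := by simp [h1]
    have e2 : (n == deft) = false := by simp [h2]
    simp only [pvRank, e1, e2, if_false, Bool.false_eq_true]
    omega

theorem pvMain (alt deft : String) :
    ∀ (t : List (String × Int)) (i : Int) (bn : String) (bw br : Int),
      0 ≤ i → pvInv alt deft i bn br →
      ((PySem.List.enumerate t i).foldl (pvStepS alt deft) (bn, bw, br)).1 = pvF alt deft (bn, bw) t := by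
  intro t
  induction t with
  | nil =>
    intro i bn bw br hi hInv
    obtain ⟨h0, h1, h2⟩ := hInv
    simp only [PySem.List.enumerate_nil, List.foldl_nil]
    -- pvF b [] = bn in every case
    simp only [pvF, pvMinWt, List.map_nil, List.foldl_nil, pvHasNW_cons, pvFirstW_cons]
    by_cases ha : bn = alt
    · simp [ha, pvHasNW]
    · have hbna : (bn == alt) = false := by simp [ha]
      by_cases hd : bn = deft
      · simp [hd, hbna, pvHasNW]
      · have hbnd : (bn == deft) = false := by simp [hd]
        simp [hbna, hbnd, pvHasNW, pvFirstW]
  | cons e t ih =>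
    intro i bn bw br hi hInv
    obtain ⟨n, w⟩ := e
    rw [PySem.List.enumerate_cons]
    simp only [List.foldl_cons]
    by_cases hcond : (w < bw ∨ (w = bw ∧ pvRank alt deft i n < br))
    · have hstep : pvStepS alt deft (bn, bw, br) (i, (n, w)) = (n, w, pvRank alt deft i n) := by
        simp only [pvStepS]; rw [if_pos hcond]
      rw [hstep, ih (i + 1) n w (pvRank alt deft i n) (by omega) (pvInv_rank alt deft n i hi),
          ← pvDrop_e alt deft bn n bw br w i t hInv hi hcond]
    · have hstep : pvStepS alt deft (bn, bw, br) (i, (n, w)) = (bn, bw, br) := by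
        simp only [pvStepS]; rw [if_neg hcond]
      obtain ⟨h0, h1, h2⟩ := hInv
      rw [hstep, ih (i + 1) bn bw br (by omega)
            (⟨h0, h1, fun x y => ⟨(h2 x y).1, by have := (h2 x y).2; omega⟩⟩),
          ← pvDrop_b alt deft bn n bw br w i t ⟨h0, h1, h2⟩ hi hcond]

-- A-side bridges
theorem pvContains_filter_map (l : List (String × Int)) (x : String) (mw : Int) :
    (((l.filter (fun p => p.2 == mw)).map Prod.fst).contains x) = pvHasNW x mw l := by
  induction l with
  | nil => simp [pvHasNW]
  | cons p l ih =>
    rw [pvHasNW_cons, ← ih]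
    by_cases h : p.2 = mw
    · rw [List.filter_cons_of_pos (by simp [h]), List.map_cons, List.contains_cons]
      have h' : (p.2 == mw) = true := by simp [h]
      have hsym : (x == p.1) = (p.1 == x) := by
        by_cases hx : x = p.1
        · simp [hx]
        · have hx' : ¬ p.1 = x := fun hh => hx hh.symm
          simp [hx, hx']
      rw [h', Bool.and_true, hsym]
    · have h' : (p.2 == mw) = false := by simp [h]
      simp [List.filter_cons, h']

theorem pvHead_filter (l : List (String × Int)) (mw : Int) :
    (l.filter (fun p => p.2 == mw)).head? = l.find? (fun p => p.2 == mw) := by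
  induction l with
  | nil => simp
  | cons p l ih =>
    by_cases h : p.2 = mw
    · simp [List.filter_cons, List.find?_cons, h]
    · have h' : (p.2 == mw) = false := by simp [h]
      simp [List.filter_cons, List.find?_cons, h', ih]

-- ===== VERDICT (by name: the statement is the Claim_ definition above) =====
theorem determine_slot_py_spec : Claim_equal_determine_slot_py := by
  intro traffic deft alt _
  unfold Spec_determine_slot_py determine_slot_py determine_slot_py_alt
  by_cases h0 : (PySem.Dict.ofList traffic).items.isEmpty
  · simp [h0]
  · simp only [h0, if_false]
    set N := pvNormalized traffic with hN
    by_cases hd : N.contains deft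
    · by_cases ha : N.contains alt
      · simp only [hd, ha, Bool.not_true, if_false, Bool.false_eq_true]
        -- N is nonempty since it contains deft
        have hne : N.items ≠ [] := by
          intro hnil
          rw [PySem.Dict.contains] at hd
          · simp [hnil] at hd
        obtain ⟨q, r, hqr⟩ : ∃ q r, N.items = q :: r := by
          cases hitems : N.items with
          | nil => exact absurd hitems hne
          | cons q r => exact ⟨q, r, rfl⟩
        have hvals : N.values = q.2 :: r.map Prod.snd := by
          simp [PySem.Dict.values, hqr]
        -- A side
        rw [hqr, hvals, PySem.List.min?_id_cons]
        have hmw : (r.map Prod.snd).foldl min q.2 = pvMinWt q r := by simp [pvMinWt]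
        rw [hmw]
        set mw := pvMinWt q r with hmwdef
        -- B side
        rw [PySem.List.enumerate_cons]
        simp only [List.foldl_cons]
        have hq : pvStep alt deft none (0, q) = some (q.1, q.2, pvRank alt deft 0 q.1) := rfl
        rw [hq, pvFoldl_step_some]
        simp only [zero_add]
        rcases hfold : List.foldl (pvStepS alt deft) (q.1, q.2, pvRank alt deft 0 q.1)
            (PySem.List.enumerate r 1) with ⟨rn, rw2, rr2⟩
        have hInv : pvInv alt deft 1 q.1 (pvRank alt deft 0 q.1) := by
          have := pvInv_rank alt deft q.1 0 (by omega)
          norm_num at this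
          exact this
        have hB := pvMain alt deft r 1 q.1 q.2 (pvRank alt deft 0 q.1) (by omega) hInv
        rw [hfold] at hB
        simp only at hB
        show _ = rn
        rw [hB]
        -- A's cascade equals pvF
        rw [pvContains_filter_map, pvContains_filter_map]
        have hattain : ∃ p ∈ (q :: r), p.2 = mw := by
          rcases pvFoldlMin_attained (r.map Prod.snd) q.2 with h | h
          · exact ⟨q, List.mem_cons_self, by rw [hmwdef, pvMinWt]; omega⟩
          · rw [hmwdef, pvMinWt] at *
            obtain ⟨p, hp, hpw⟩ := List.mem_map.mp h
            exact ⟨p, List.mem_cons_of_mem _ hp, hpw⟩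
        obtain ⟨p0, hp0mem, hp0w⟩ := hattain
        have hfind : ∃ p1, (q :: r).find? (fun p => p.2 == mw) = some p1 := by
          have hex : ∃ p ∈ (q :: r), (fun (p : String × Int) => p.2 == mw) p = true :=
            ⟨p0, hp0mem, by simp [hp0w]⟩
          rcases List.find?_isSome.mpr hex |> Option.isSome_iff_exists.mp with ⟨p1, hp1⟩
          exact ⟨p1, hp1⟩
        obtain ⟨p1, hp1⟩ := hfind
        have hhead : ((q :: r).filter (fun p => p.2 == mw)).head? = some p1 := by
          rw [pvHead_filter]; exact hp1
        have hget : PySem.List.pyGet? (((q :: r).filter (fun p => p.2 == mw)).map Prod.fst) 0 = some p1.1 := by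
          cases hflt : ((q :: r).filter (fun p => p.2 == mw)) with
          | nil => simp [hflt] at hhead
          | cons c cs =>
            rw [hflt] at hhead
            simp only [List.head?_cons, Option.some.injEq] at hhead
            simp [PySem.List.pyGet?, PySem.List.pyIdx?, hhead]
        rw [hget]
        have hfw : pvFirstW mw (q :: r) = p1.1 := by simp [pvFirstW, hp1]
        simp only [Option.getD_some, pvF, Prod.mk.eta, ← hmwdef, hfw]
      · simp [ha]
    · simp [hd]
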